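-- pv_equiv track=rewrite | github.com/JBHutson/Poker | calc.py | checkOnePairToTwoPairOrSet
-- ===== SOURCE A (Python) =====
-- from collections import Counter
--
-- def checkOnePairToTwoPairOrSet(totalCards):
--     """ Check for two pair or set draw
--
--     Params:
--     totalCards (list): list containing all of the cards in play
--
--     Returns:
--     Bool: true if there is a draw, false if not
--     """
--     cardVals = []
--
--     for card in totalCards:
--         cardVal = card[:-1]
--         cardVals.append(cardVal)
--
--     cardDict = Counter(cardVals)
--
--     if cardVals[0] == cardVals[1]:
--         return False
--
--     for val in cardDict:
--         if cardDict.get(val) == 2: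
--             return True
--
--     return False
-- ===== SOURCE B (Python) =====
-- def checkOnePairToTwoPairOrSet(totalCards):
--     values = [card[:-1] for card in totalCards]
--     if values[0] == values[1]:
--         return False
--     svals = sorted(values)
--     prev = svals[0]
--     run = 1
--     for v in svals[1:]:
--         if v == prev:
--             run += 1
--         else:
--             if run == 2:
--                 return True
--             prev, run = v, 1
--     return run == 2
-- ===== Notes on version B (the rewrite author's own statement) =====
-- stated objective: alternative
-- what changed: Replaces the Counter hash-table plus key-iteration with sorting a copy of the values and a single run-length scan over the sorted list, returning True when a consecutive run has length exactly 2.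
import Mathlib
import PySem

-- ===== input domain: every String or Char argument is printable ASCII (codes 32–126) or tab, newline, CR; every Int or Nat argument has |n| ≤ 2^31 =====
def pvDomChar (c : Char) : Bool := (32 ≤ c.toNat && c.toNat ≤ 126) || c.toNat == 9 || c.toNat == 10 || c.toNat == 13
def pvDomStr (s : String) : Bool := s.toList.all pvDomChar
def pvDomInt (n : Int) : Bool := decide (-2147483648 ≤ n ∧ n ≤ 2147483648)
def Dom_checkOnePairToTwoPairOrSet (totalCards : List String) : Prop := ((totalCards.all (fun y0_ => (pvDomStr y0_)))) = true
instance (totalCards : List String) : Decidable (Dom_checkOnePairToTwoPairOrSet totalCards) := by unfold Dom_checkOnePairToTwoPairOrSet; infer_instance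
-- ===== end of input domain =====

-- B replaces A's Counter + key-iteration by sorting a copy of the card values and
-- scanning it once for a consecutive run of length exactly 2 (alternative decomposition).

-- ===== PORT A =====
-- the 'for val in cardDict: if cardDict.get(val) == 2: return True' loop over the Counter's keys
def pvLoopA (d : PySem.Dict String Int) : List String → Bool
  | [] => false
  | k :: ks => if d.getD k 0 == 2 then true else pvLoopA d ks

def checkOnePairToTwoPairOrSet (totalCards : List String) : Bool :=
  let cardVals := totalCards.foldl (fun acc card => acc ++ [PySem.Str.slice card none (some (-1))]) []
  let cardDict := PySem.Dict.counter cardVals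
  match PySem.List.pyGet? cardVals 0, PySem.List.pyGet? cardVals 1 with
  | some a, some b => if a == b then false else pvLoopA cardDict cardDict.keys
  | _, _ => false   -- cardVals[0] / cardVals[1]: IndexError, excluded by Pre_

-- ===== PORT B =====
-- the run-length scan over the tail of the sorted values, carrying (prev, run)
def pvRunScan : String → Nat → List String → Bool
  | _, run, [] => run == 2
  | prev, run, v :: rest =>
    if v == prev then pvRunScan prev (run + 1) rest
    else if run == 2 then true
    else pvRunScan v 1 rest

def checkOnePairToTwoPairOrSet_alt (totalCards : List String) : Bool :=
  let values := totalCards.map (fun card => PySem.Str.slice card none (some (-1)))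
  match PySem.List.pyGet? values 0 with
  | none => false   -- values[0]: IndexError, excluded by Pre_
  | some a =>
    match PySem.List.pyGet? values 1 with
    | none => false   -- values[1]: IndexError, excluded by Pre_
    | some b =>
      if a == b then false
      else
        match PySem.List.sorted values (fun x => x) false with
        | [] => false   -- unreachable: values has ≥ 2 elements here
        | s0 :: srest => pvRunScan s0 1 srest

-- ===== PRECONDITION & SPEC =====
-- Pre_: with fewer than two cards both A and B raise IndexError at values[0]/values[1]
def Pre_checkOnePairToTwoPairOrSet (totalCards : List String) : Prop := 2 ≤ totalCards.length
instance (totalCards : List String) : Decidable (Pre_checkOnePairToTwoPairOrSet totalCards) := by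
  unfold Pre_checkOnePairToTwoPairOrSet; infer_instance

def pvWitness_checkOnePairToTwoPairOrSet : List String := ["2h", "3s", "3d"]

def Spec_checkOnePairToTwoPairOrSet (totalCards : List String) (out : Bool) : Prop := out = checkOnePairToTwoPairOrSet_alt totalCards
instance (totalCards : List String) (out : Bool) : Decidable (Spec_checkOnePairToTwoPairOrSet totalCards out) := by unfold Spec_checkOnePairToTwoPairOrSet; infer_instance

-- ===== CLAIM (what is proved, stated in full; the proofs are below) =====
def Claim_equal_checkOnePairToTwoPairOrSet : Prop := ∀ (totalCards : List String), Dom_checkOnePairToTwoPairOrSet totalCards → Pre_checkOnePairToTwoPairOrSet totalCards → Spec_checkOnePairToTwoPairOrSet totalCards (checkOnePairToTwoPairOrSet totalCards)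

-- ===== LEMMAS AND PROOFS =====

-- A's append-loop builds exactly the map
theorem pvCardVals_eq (totalCards : List String) :
    totalCards.foldl (fun acc card => acc ++ [PySem.Str.slice card none (some (-1))]) []
      = totalCards.map (fun card => PySem.Str.slice card none (some (-1))) := by
  simpa using PySem.List.foldl_append_singleton_eq_map (f := fun card => PySem.Str.slice card none (some (-1))) (l := totalCards) ([] : List String)

-- A's key loop finds a key with count 2
theorem pvLoopA_true_iff (d : PySem.Dict String Int) (ks : List String) :
    pvLoopA d ks = true ↔ ∃ k ∈ ks, d.getD k 0 = 2 := by
  induction ks with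
  | nil => simp [pvLoopA]
  | cons k ks ih =>
    simp only [pvLoopA]
    by_cases h : d.getD k 0 = 2
    · simp [h]
    · simp [h, ih]

theorem pvA_true_iff (vals : List String) :
    pvLoopA (PySem.Dict.counter vals) (PySem.Dict.counter vals).keys = true
      ↔ ∃ v, vals.count v = 2 := by
  rw [pvLoopA_true_iff]
  constructor
  · rintro ⟨k, _, hk⟩
    rw [PySem.Dict.getD_counter] at hk
    exact ⟨k, by exact_mod_cast hk⟩
  · rintro ⟨v, hv⟩
    refine ⟨v, ?_, ?_⟩
    · rw [PySem.Dict.keys_counter]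
      have hvmem : v ∈ vals := by
        rw [← List.count_pos_iff]; omega
      simpa [PySem.Set.mem_ofList] using hvmem
    · rw [PySem.Dict.getD_counter, hv]; simp

-- B's run scan on a sorted tail
theorem pvRunScan_true_iff (prev : String) (run : Nat) (rest : List String)
    (hs : rest.Pairwise (· ≤ ·)) (hge : ∀ x ∈ rest, prev ≤ x) :
    pvRunScan prev run rest = true
      ↔ (run + rest.count prev = 2) ∨ ∃ v ∈ rest, v ≠ prev ∧ rest.count v = 2 := by
  induction rest generalizing prev run with
  | nil => simp [pvRunScan]
  | cons x rest ih =>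
    rcases List.pairwise_cons.mp hs with ⟨hx, hrest⟩
    by_cases hxp : x = prev
    · subst hxp
      simp only [pvRunScan, BEq.rfl, if_true]
      rw [ih x (run + 1) hrest hx]
      constructor
      · rintro (h | ⟨v, hv, hne, hc⟩)
        · left; simp; omega
        · right; exact ⟨v, List.mem_cons_of_mem _ hv, hne, by simp [Ne.symm hne]; exact hc⟩
      · rintro (h | ⟨v, hv, hne, hc⟩)
        · left; simp at h ⊢; omega
        · right
          rcases List.mem_cons.mp hv with h' | h'
          · exact absurd h' hne
          · exact ⟨v, h', hne, by simp [Ne.symm hne] at hc; exact hc⟩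
    · have hlt : prev < x := lt_of_le_of_ne (hge x (List.mem_cons_self)) (fun h => hxp h.symm)
      have hpnot : prev ∉ x :: rest := by
        intro hmem
        rcases List.mem_cons.mp hmem with h | h
        · exact hxp h.symm
        · exact absurd (hx prev h) (not_le.mpr hlt)
      have hcp : (x :: rest).count prev = 0 := List.count_eq_zero.mpr hpnot
      simp only [pvRunScan, beq_iff_eq, hxp, if_false]
      by_cases hr : run = 2
      · rw [if_pos hr]
        constructor
        · intro _; left; omega
        · intro _; rfl
      · rw [if_neg hr]
        rw [ih x 1 hrest hx]
        constructor
        · rintro (h | ⟨v, hv, hne, hc⟩)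
          · right
            refine ⟨x, List.mem_cons_self, fun h' => hxp h', ?_⟩
            simp; omega
          · right
            refine ⟨v, List.mem_cons_of_mem _ hv, fun h' => hpnot (by rw [← h']; exact List.mem_cons_of_mem _ hv), ?_⟩
            simp [Ne.symm hne]; exact hc
        · rintro (h | ⟨v, hv, hne, hc⟩)
          · omega
          · rcases List.mem_cons.mp hv with h' | h'
            · subst h'
              left; simp at hc; omega
            · by_cases hvx : v = x
              · subst hvx; left; simp at hc; omega
              · right; exact ⟨v, h', hvx, by simp [Ne.symm hvx] at hc; exact hc⟩

theorem pvB_true_iff (s0 : String) (srest : List String)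
    (hs : (s0 :: srest).Pairwise (· ≤ ·)) :
    pvRunScan s0 1 srest = true ↔ ∃ v, (s0 :: srest).count v = 2 := by
  rcases List.pairwise_cons.mp hs with ⟨h0, hrest⟩
  rw [pvRunScan_true_iff s0 1 srest hrest h0]
  constructor
  · rintro (h | ⟨v, hv, hne, hc⟩)
    · exact ⟨s0, by simp; omega⟩
    · exact ⟨v, by simp [Ne.symm hne]; exact hc⟩
  · rintro ⟨v, hv⟩
    by_cases hvs : v = s0
    · subst hvs; left; simp at hv; omega
    · right
      have hvmem : v ∈ s0 :: srest := by rw [← List.count_pos_iff]; omega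
      rcases List.mem_cons.mp hvmem with h | h
      · exact absurd h hvs
      · exact ⟨v, h, hvs, by simp [Ne.symm hvs] at hv; exact hv⟩

-- ===== VERDICT (by name: the statement is the Claim_ definition above) =====
theorem checkOnePairToTwoPairOrSet_spec : Claim_equal_checkOnePairToTwoPairOrSet := by
  intro totalCards _ hpre
  unfold Spec_checkOnePairToTwoPairOrSet checkOnePairToTwoPairOrSet checkOnePairToTwoPairOrSet_alt
  rw [pvCardVals_eq]
  set vals := totalCards.map (fun card => PySem.Str.slice card none (some (-1))) with hvals
  have hlen : 2 ≤ vals.length := by simpa [hvals] using hpre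
  have h0 : PySem.List.pyGet? vals 0 = vals[0]? := by
    have := PySem.List.pyGet?_natCast (xs := vals) (n := 0); simpa using this
  have h1 : PySem.List.pyGet? vals 1 = vals[1]? := by
    have := PySem.List.pyGet?_natCast (xs := vals) (n := 1); simpa using this
  have hg0 : PySem.List.pyGet? vals 0 = some (vals[0]'(by omega)) := by
    rw [h0]; exact List.getElem?_eq_getElem (by omega)
  have hg1 : PySem.List.pyGet? vals 1 = some (vals[1]'(by omega)) := by
    rw [h1]; exact List.getElem?_eq_getElem (by omega)
  simp only [hg0, hg1]
  set a := vals[0]'(by omega)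
  set b := vals[1]'(by omega)
  show (if (a == b) = true then false else pvLoopA (PySem.Dict.counter vals) (PySem.Dict.counter vals).keys)
      = (if (a == b) = true then false else
          match PySem.List.sorted vals (fun x => x) false with
          | [] => false
          | s0 :: srest => pvRunScan s0 1 srest)
  by_cases hab : a = b
  · simp [hab]
  · have habb : (a == b) = false := by simp [hab]
    rw [habb]
    simp only [Bool.false_eq_true, if_false]
    have hperm : (PySem.List.sorted vals (fun x => x) false).Perm vals :=
      PySem.List.sorted_perm vals (fun x => x) false
    cases hss : PySem.List.sorted vals (fun x => x) false with
    | nil =>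
      exfalso
      have := hperm.length_eq
      rw [hss] at this; simp at this; omega
    | cons s0 srest =>
      have hpw : (s0 :: srest).Pairwise (· ≤ ·) := by
        have := PySem.List.sorted_pairwise vals (fun x => x)
        rw [hss] at this; simpa using this
      have hiffB := pvB_true_iff s0 srest hpw
      have hiffA := pvA_true_iff vals
      have hcount : ∀ v, vals.count v = (s0 :: srest).count v := by
        intro v
        rw [hss] at hperm
        exact (hperm.count_eq v).symm
      show pvLoopA (PySem.Dict.counter vals) (PySem.Dict.counter vals).keys = pvRunScan s0 1 srest
      rcases Bool.eq_false_or_eq_true (pvRunScan s0 1 srest) with hB | hB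
      · rw [hB]
        rcases hiffB.mp hB with ⟨v, hv⟩
        exact hiffA.mpr ⟨v, by rw [hcount]; exact hv⟩
      · rw [hB]
        rcases Bool.eq_false_or_eq_true (pvLoopA (PySem.Dict.counter vals) (PySem.Dict.counter vals).keys) with hA | hA
        · exfalso
          rcases hiffA.mp hA with ⟨v, hv⟩
          have : pvRunScan s0 1 srest = true := hiffB.mpr ⟨v, by rw [← hcount]; exact hv⟩
          rw [hB] at this; exact Bool.false_ne_true this
        · exact hA
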